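-- pv_equiv track=rewrite | github.com/21jagerard/COSC_001 | Exam 2 Prep/Nested Loops/P1.py | func
-- ===== SOURCE A (Python) =====
-- def is_increasing(glist):
--     for i in range(len(glist) - 1):
--         if glist[i] > glist[i + 1]:
--             return False
--     return True
--
-- def is_decreasing(glist):
--     for i in range(len(glist) - 1):
--         if glist[i] < glist[i + 1]:
--             return False
--     return True
--
-- def func(glol):
--     inc = False
--     dec = False
--     for i in glol:
--         if is_increasing(i):
--             inc = True
--         if is_decreasing(i):
--             dec = True
--     return inc and dec
-- ===== SOURCE B (Python) =====
-- def func(glol):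
--     inc = any(sub == sorted(sub) for sub in glol)
--     dec = any(sub == sorted(sub, reverse=True) for sub in glol)
--     return inc and dec
-- ===== Notes on version B (the rewrite author's own statement) =====
-- stated objective: idiomatic
-- what changed: Replaces the two adjacent-pair index scans and the manual flag loop with the sortedness idiom: a sublist is non-decreasing iff it equals sorted(sub) and non-increasing iff it equals sorted(sub, reverse=True), combined with two any(...) generator expressions.
import Mathlib
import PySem

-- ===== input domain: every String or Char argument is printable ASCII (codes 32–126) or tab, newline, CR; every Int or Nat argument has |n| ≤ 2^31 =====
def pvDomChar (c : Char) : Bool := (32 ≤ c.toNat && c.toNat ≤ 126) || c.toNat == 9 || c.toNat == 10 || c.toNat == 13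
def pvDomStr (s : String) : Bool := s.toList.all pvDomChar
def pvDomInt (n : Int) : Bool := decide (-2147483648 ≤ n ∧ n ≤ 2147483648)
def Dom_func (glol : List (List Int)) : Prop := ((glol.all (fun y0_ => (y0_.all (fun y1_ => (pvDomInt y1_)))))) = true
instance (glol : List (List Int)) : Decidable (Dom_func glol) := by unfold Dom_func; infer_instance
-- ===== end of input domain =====

-- B replaces the adjacent-pair scans and the flag loop with the `sub == sorted(sub)` idiom; objective: more idiomatic, same results.

-- ===== PORT A =====
-- adjacent-pair scan with early return (the range(len-1) loop of A, as structural recursion on the list)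
def is_increasing : List Int → Bool
  | a :: b :: t => if a > b then false else is_increasing (b :: t)
  | _ => true

def is_decreasing : List Int → Bool
  | a :: b :: t => if a < b then false else is_decreasing (b :: t)
  | _ => true

def func (glol : List (List Int)) : Bool :=
  let s := glol.foldl (fun (s : Bool × Bool) i =>
    (if is_increasing i then true else s.1,
     if is_decreasing i then true else s.2)) (false, false)
  s.1 && s.2

-- ===== PORT B =====
def func_alt (glol : List (List Int)) : Bool :=
  let inc := glol.any (fun sub => sub == PySem.List.sorted sub (fun x => x) false)
  let dec := glol.any (fun sub => sub == PySem.List.sorted sub (fun x => x) true)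
  inc && dec

-- ===== PRECONDITION & SPEC =====
def Spec_func (glol : List (List Int)) (out : Bool) : Prop := out = func_alt glol
instance (glol : List (List Int)) (out : Bool) : Decidable (Spec_func glol out) := by unfold Spec_func; infer_instance

-- ===== CLAIM (what is proved, stated in full; the proofs are below) =====
def Claim_equal_func : Prop := ∀ (glol : List (List Int)), Dom_func glol → Spec_func glol (func glol)

-- ===== LEMMAS AND PROOFS =====

theorem inc_iff_chain (g : List Int) : is_increasing g = true ↔ List.IsChain (· ≤ ·) g := by
  induction g with
  | nil => simp [is_increasing]
  | cons a t ih =>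
    cases t with
    | nil => simp [is_increasing]
    | cons b t' =>
      simp only [is_increasing, List.isChain_cons_cons]
      by_cases hab : a > b
      · rw [if_pos hab]
        constructor
        · intro h; exact absurd h (by simp)
        · rintro ⟨h1, -⟩; omega
      · rw [if_neg hab, ih]
        have hle : a ≤ b := by omega
        simp [hle]

theorem dec_iff_chain (g : List Int) : is_decreasing g = true ↔ List.IsChain (fun a b : Int => b ≤ a) g := by
  induction g with
  | nil => simp [is_decreasing]
  | cons a t ih =>
    cases t with
    | nil => simp [is_decreasing]
    | cons b t' =>
      simp only [is_decreasing, List.isChain_cons_cons]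
      by_cases hab : a < b
      · rw [if_pos hab]
        constructor
        · intro h; exact absurd h (by simp)
        · rintro ⟨h1, -⟩; omega
      · rw [if_neg hab, ih]
        have hle : b ≤ a := by omega
        simp [hle]

theorem inc_eq_sorted (g : List Int) :
    is_increasing g = (g == PySem.List.sorted g (fun x => x) false) := by
  rcases h : is_increasing g with _ | _
  · symm
    rw [beq_eq_false_iff_ne]
    intro he
    have hp := PySem.List.sorted_pairwise (xs := g) (key := fun x => x)
    rw [← he] at hp
    have := (inc_iff_chain g).mpr (hp.isChain)
    simp [this] at h
  · have hc := (inc_iff_chain g).mp h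
    have hp : g.Pairwise (fun a b : Int => a ≤ b) :=
      List.isChain_iff_pairwise.mp hc
    have := PySem.List.sorted_eq_self_of_pairwise (xs := g) (key := fun x => x) hp
    simp [this]

theorem dec_eq_sorted (g : List Int) :
    is_decreasing g = (g == PySem.List.sorted g (fun x => x) true) := by
  rcases h : is_decreasing g with _ | _
  · symm
    rw [beq_eq_false_iff_ne]
    intro he
    have hp := PySem.List.sorted_pairwise_rev (xs := g) (key := fun x => x)
    rw [← he] at hp
    have := (dec_iff_chain g).mpr (hp.isChain)
    simp [this] at h
  · have hc := (dec_iff_chain g).mp h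
    have hp : g.Pairwise (fun a b : Int => b ≤ a) :=
      List.isChain_iff_pairwise.mp hc
    have := PySem.List.sorted_rev_eq_self_of_pairwise (xs := g) (key := fun x => x) hp
    simp [this]

theorem foldl_flags (l : List (List Int)) (a b : Bool) :
    l.foldl (fun (s : Bool × Bool) i =>
      (if is_increasing i then true else s.1,
       if is_decreasing i then true else s.2)) (a, b)
    = (a || l.any is_increasing, b || l.any is_decreasing) := by
  induction l generalizing a b with
  | nil => simp
  | cons x t ih =>
    simp only [List.foldl_cons, List.any_cons, ih]
    rcases hi : is_increasing x <;> rcases hd : is_decreasing x <;> simp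

theorem func_eq (glol : List (List Int)) : func glol = func_alt glol := by
  unfold func func_alt
  rw [foldl_flags]
  simp only [Bool.false_or]
  rw [funext inc_eq_sorted, funext dec_eq_sorted]

-- ===== VERDICT (by name: the statement is the Claim_ definition above) =====
theorem func_spec : Claim_equal_func := by
  intro glol _
  exact func_eq glol
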